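-- pv_equiv track=rewrite | github.com/cynthiaxfu/15112-Term-Project | 15112-term-project/tp3.py | getOtherEyebrow
-- ===== SOURCE A (Python) =====
-- def getOtherEyebrow(eyebrow):
--     otherEyebrow = []
--     for i in range(len(eyebrow)):
--         if i % 2 == 0:
--             otherEyebrow.append(-eyebrow[i])
--         else:
--             otherEyebrow.append(eyebrow[i])
--     return (otherEyebrow)
-- ===== SOURCE B (Python) =====
-- def getOtherEyebrow(eyebrow):
--     other = []
--     n = len(eyebrow)
--     i = 0
--     while i + 1 < n:
--         other += [-eyebrow[i], eyebrow[i + 1]]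
--         i += 2
--     if i < n:
--         other.append(-eyebrow[i])
--     return other
-- ===== Notes on version B (the rewrite author's own statement) =====
-- stated objective: alternative
-- what changed: Replaces the per-index loop with an i%2 parity branch by a while loop that consumes the list in (even, odd) pairs, appending -eyebrow[i] and eyebrow[i+1] per step and handling a leftover element after the loop; no parity test remains.
import Mathlib
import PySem

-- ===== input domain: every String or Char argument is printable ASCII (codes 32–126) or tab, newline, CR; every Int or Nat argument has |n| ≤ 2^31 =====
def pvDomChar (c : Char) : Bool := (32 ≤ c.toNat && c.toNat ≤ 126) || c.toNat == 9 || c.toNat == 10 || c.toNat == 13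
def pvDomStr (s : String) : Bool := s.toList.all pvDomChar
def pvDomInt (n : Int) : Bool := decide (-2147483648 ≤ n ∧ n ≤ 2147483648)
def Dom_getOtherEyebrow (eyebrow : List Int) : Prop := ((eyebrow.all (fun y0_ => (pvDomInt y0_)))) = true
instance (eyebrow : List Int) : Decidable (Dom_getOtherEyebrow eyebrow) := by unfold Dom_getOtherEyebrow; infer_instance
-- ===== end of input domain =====

-- B replaces A's per-index loop with a parity branch by a while loop consuming (even, odd)
-- pairs plus a leftover step; equivalence of the two is proved on all inputs (both are total).

-- ===== PORT A =====
-- literal port of A: for i in range(len(eyebrow)): if i % 2 == 0: append(-eyebrow[i]) else append(eyebrow[i])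
-- (eyebrow[i] is always in range here, so pyGetD with default 0 is exact)
def getOtherEyebrow (eyebrow : List Int) : List Int :=
  (PySem.List.pyRange 0 eyebrow.length 1).foldl
    (fun acc i =>
      if i % 2 == 0 then acc ++ [-(PySem.List.pyGetD eyebrow i 0)]
      else acc ++ [PySem.List.pyGetD eyebrow i 0]) []

-- ===== PORT B =====
-- the while loop of Source B: state (i, other); after the loop, the trailing 'if i < n: append'
def pairLoop (eyebrow : List Int) (n i : Int) (other : List Int) : List Int :=
  if _h : i + 1 < n then
    pairLoop eyebrow n (i + 2)
      (other ++ [-(PySem.List.pyGetD eyebrow i 0), PySem.List.pyGetD eyebrow (i + 1) 0])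
  else if i < n then other ++ [-(PySem.List.pyGetD eyebrow i 0)]
  else other
termination_by (n - i).toNat
decreasing_by omega

def getOtherEyebrow_alt (eyebrow : List Int) : List Int :=
  pairLoop eyebrow eyebrow.length 0 []

-- ===== PRECONDITION & SPEC =====
def Spec_getOtherEyebrow (eyebrow : List Int) (out : List Int) : Prop := out = getOtherEyebrow_alt eyebrow
instance (eyebrow : List Int) (out : List Int) : Decidable (Spec_getOtherEyebrow eyebrow out) := by unfold Spec_getOtherEyebrow; infer_instance

-- ===== CLAIM (what is proved, stated in full; the proofs are below) =====
def Claim_equal_getOtherEyebrow : Prop := ∀ (eyebrow : List Int), Dom_getOtherEyebrow eyebrow → Spec_getOtherEyebrow eyebrow (getOtherEyebrow eyebrow)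

-- ===== LEMMAS AND PROOFS =====

-- proof-only pairwise recursion both sides are reduced to
def pairsG : List Int → List Int
  | [] => []
  | [a] => [-a]
  | a :: b :: r => -a :: b :: pairsG r

theorem rangeMap_eq_pairsG : ∀ xs : List Int,
    (List.range xs.length).map
      (fun k : Nat => if ((k : Int) % 2 == 0) then -(xs.getD k 0) else xs.getD k 0) = pairsG xs
  | [] => by simp [pairsG]
  | [a] => by simp [pairsG]
  | a :: b :: r => by
    have ih := rangeMap_eq_pairsG r
    have hpar : ∀ k : Nat, ((((k:Int) + 1 + 1) % 2 == 0)) = (((k : Nat) : Int) % 2 == 0) := by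
      intro k
      have h : ((k:Int) + 1 + 1) % 2 = ((k : Nat) : Int) % 2 := by omega
      rw [h]
    simp only [List.length_cons, List.range_succ_eq_map, List.map_cons, List.map_map,
      Function.comp_def]
    push_cast
    simp only [hpar, List.getD_cons_succ]
    rw [ih]
    norm_num [pairsG, List.getD]

theorem A_eq_pairsG (xs : List Int) : getOtherEyebrow xs = pairsG xs := by
  unfold getOtherEyebrow
  have hfun : (fun (acc : List Int) (i : Int) =>
      if i % 2 == 0 then acc ++ [-(PySem.List.pyGetD xs i 0)]
      else acc ++ [PySem.List.pyGetD xs i 0]) =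
      fun acc i => acc ++ [if i % 2 == 0 then -(PySem.List.pyGetD xs i 0)
                           else PySem.List.pyGetD xs i 0] := by
    funext acc i; split <;> rfl
  rw [hfun, PySem.List.foldl_append_singleton_eq_map, List.nil_append,
     PySem.List.pyRange_zero_natCast, List.map_map]
  rw [← rangeMap_eq_pairsG xs]
  apply List.map_congr_left
  intro k _
  simp [PySem.List.pyGetD_natCast]

theorem pairLoop_eq (xs : List Int) (k : Nat) (acc : List Int) :
    pairLoop xs xs.length (k : Int) acc = acc ++ pairsG (xs.drop k) := by
  rw [pairLoop]
  split
  · rename_i h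
    have hk1 : k + 1 < xs.length := by exact_mod_cast h
    have g1 : PySem.List.pyGetD xs (k : Int) 0 = xs[k]'(by omega) := by
      rw [PySem.List.pyGetD_natCast]; exact List.getD_eq_getElem xs 0 (by omega)
    have g2 : PySem.List.pyGetD xs ((k : Int) + 1) 0 = xs[k + 1] := by
      rw [show ((k : Int) + 1) = ((k + 1 : Nat) : Int) by push_cast; ring,
        PySem.List.pyGetD_natCast]
      exact List.getD_eq_getElem xs 0 hk1
    have h2 : ((k : Int) + 2) = ((k + 2 : Nat) : Int) := by push_cast; ring
    rw [g1, g2, h2, pairLoop_eq xs (k + 2)]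
    have hd : xs.drop k = xs[k]'(by omega) :: xs[k + 1] :: xs.drop (k + 2) := by
      rw [List.drop_eq_getElem_cons (by omega), List.drop_eq_getElem_cons (by omega)]
    rw [hd]
    simp [pairsG]
  · rename_i h
    split
    · rename_i hlt
      have hk : k < xs.length := by exact_mod_cast hlt
      have g1 : PySem.List.pyGetD xs (k : Int) 0 = xs[k] := by
        rw [PySem.List.pyGetD_natCast]; exact List.getD_eq_getElem xs 0 hk
      have hd : xs.drop k = [xs[k]] := by
        rw [List.drop_eq_getElem_cons hk, List.drop_eq_nil_of_le (by omega : xs.length ≤ k + 1)]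
      rw [g1, hd]
      simp [pairsG]
    · rename_i hge
      have hk : xs.length ≤ k := by omega
      rw [List.drop_eq_nil_of_le hk]
      simp [pairsG]
termination_by xs.length - k
decreasing_by omega

-- ===== VERDICT (by name: the statement is the Claim_ definition above) =====
theorem getOtherEyebrow_spec : Claim_equal_getOtherEyebrow := by
  intro eyebrow _
  unfold Spec_getOtherEyebrow getOtherEyebrow_alt
  have h := pairLoop_eq eyebrow 0 []
  simp at h
  rw [A_eq_pairsG, h]
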